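-- pv_equiv track=rewrite | github.com/mrozo/hut | dsv.py | dsv_record_load
-- ===== SOURCE A (Python) =====
-- def dsv_value_load(line, delimiter=';'):
--     escape_sequences = {
--         'a':'\a',
--         'b':'\b',
--         'f':'\f',
--         'n':'\n',
--         'r':'\r',
--         't':'\t',
--         'v':'\v'
--     }
--     escape=False
--     offset=0
--     value=''
--     while offset < len(line):
--         c = line[offset]
--         offset+=1
--         if escape:
--             value += escape_sequences.get(c, c)
--             escape = False
--         elif c=='\\':
--             escape=True
--         elif c==delimiter:
--             break
--         else:
--             value+=c
--     return value, offset
--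
-- def dsv_record_load(line, delimiter=';'):
--     line=line.strip()
--     offset = 0
--     parsed = []
--     while offset < len(line):
--         value, parsed_chars = dsv_value_load(line[offset:], delimiter)
--         offset += parsed_chars
--         parsed.append(value)
--     return parsed
-- ===== SOURCE B (Python) =====
-- _ESCAPES = {'a': '\a', 'b': '\b', 'f': '\f', 'n': '\n', 'r': '\r', 't': '\t', 'v': '\v'}
--
-- def dsv_record_load(line, delimiter=';'):
--     s = line.strip()
--     out = []
--     cur = []
--     esc = False
--     hit = False  # last processed char ended a field via an unescaped delimiter
--     for c in s:
--         if esc: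
--             cur.append(_ESCAPES.get(c, c))
--             esc = False
--             hit = False
--         elif c == '\\':
--             esc = True
--             hit = False
--         elif c == delimiter:
--             out.append(''.join(cur))
--             cur = []
--             hit = True
--         else:
--             cur.append(c)
--             hit = False
--     if s and not hit:
--         out.append(''.join(cur))
--     return out
-- ===== Notes on version B (the rewrite author's own statement) =====
-- stated objective: faster
-- what changed: A re-slices the line and restarts a value-parsing helper for every field (quadratic copying); B is a single left-to-right pass over the stripped line tracking escape state and a field-just-ended flag, appending fields as it goes.
import Mathlib
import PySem

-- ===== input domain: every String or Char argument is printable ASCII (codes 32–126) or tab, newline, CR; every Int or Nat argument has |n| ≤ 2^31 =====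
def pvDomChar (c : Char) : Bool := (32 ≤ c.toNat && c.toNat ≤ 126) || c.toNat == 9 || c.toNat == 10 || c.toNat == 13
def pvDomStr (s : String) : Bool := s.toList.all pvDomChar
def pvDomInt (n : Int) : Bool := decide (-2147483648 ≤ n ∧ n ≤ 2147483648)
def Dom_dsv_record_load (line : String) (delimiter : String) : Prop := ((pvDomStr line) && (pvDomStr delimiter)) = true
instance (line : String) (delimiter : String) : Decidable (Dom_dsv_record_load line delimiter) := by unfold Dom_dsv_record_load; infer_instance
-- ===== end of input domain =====

-- B replaces A's quadratic re-slicing (one slice per field) by a single left-to-right pass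
-- over the stripped line tracking escape state; objective: faster (asymptotic, O(n^2) -> O(n)).


-- ===== PORT A =====

-- escape_sequences.get(c, c)
def pvEscGet (c : Char) : Char :=
  if c = 'a' then '\x07'
  else if c = 'b' then '\x08'
  else if c = 'f' then '\x0C'
  else if c = 'n' then '\n'
  else if c = 'r' then '\r'
  else if c = 't' then '\t'
  else if c = 'v' then '\x0B'
  else c

-- dsv_value_load's while loop: walks the remaining characters carrying (escape, value),
-- returns (value, number of consumed characters)
def pvValueLoad (delimiter : String) (escape : Bool) (value : List Char) :
    List Char → List Char × Nat
  | [] => (value, 0)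
  | c :: rest =>
    if escape then
      let p := pvValueLoad delimiter false (value ++ [pvEscGet c]) rest
      (p.1, p.2 + 1)
    else if c = '\\' then
      let p := pvValueLoad delimiter true value rest
      (p.1, p.2 + 1)
    else if String.mk [c] = delimiter then
      (value, 1)
    else
      let p := pvValueLoad delimiter false (value ++ [c]) rest
      (p.1, p.2 + 1)

theorem pvValueLoad_pos (delimiter : String) (escape : Bool) (value cs : List Char)
    (h : cs ≠ []) : 1 ≤ (pvValueLoad delimiter escape value cs).2 ∧
      (pvValueLoad delimiter escape value cs).2 ≤ cs.length := by
  induction cs generalizing escape value with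
  | nil => exact absurd rfl h
  | cons c rest ih =>
    simp only [pvValueLoad]
    split_ifs with h1 h2 h3
    · rcases em (rest = []) with hr | hr
      · subst hr; simp [pvValueLoad]
      · have := ih (escape := false) (value := value ++ [pvEscGet c]) hr
        simpa using by omega
    · rcases em (rest = []) with hr | hr
      · subst hr; simp [pvValueLoad]
      · have := ih (escape := true) (value := value) hr
        simpa using by omega
    · simp
    · rcases em (rest = []) with hr | hr
      · subst hr; simp [pvValueLoad]
      · have := ih (escape := false) (value := value ++ [c]) hr
        simpa using by omega

-- dsv_record_load's while loop: repeatedly load a value from the remaining suffix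
def pvRecordLoad (delimiter : String) (cs : List Char) : List (List Char) :=
  if h : cs = [] then []
  else
    let p := pvValueLoad delimiter false [] cs
    p.1 :: pvRecordLoad delimiter (cs.drop p.2)
termination_by cs.length
decreasing_by
  have hp := pvValueLoad_pos delimiter false [] cs h
  have hl : cs.length ≠ 0 := fun h0 => h (List.eq_nil_of_length_eq_zero h0)
  simp only [List.length_drop]
  omega

def dsv_record_load (line : String) (delimiter : String) : List String :=
  ((pvRecordLoad delimiter (PySem.Str.strip line).toList).map String.mk)

-- ===== PORT B =====

-- one step of B's single pass; state = (out, cur, esc, hit)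
def pvAltStep (delimiter : String)
    (s : List (List Char) × List Char × Bool × Bool) (c : Char) :
    List (List Char) × List Char × Bool × Bool :=
  match s with
  | (out, cur, esc, _) =>
    if esc then (out, cur ++ [pvEscGet c], false, false)
    else if c = '\\' then (out, cur, true, false)
    else if String.mk [c] = delimiter then (out ++ [cur], [], false, true)
    else (out, cur ++ [c], false, false)

def dsv_record_load_alt (line : String) (delimiter : String) : List String :=
  let t := (PySem.Str.strip line).toList
  let r := t.foldl (pvAltStep delimiter) ([], [], false, false)
  (if t ≠ [] ∧ r.2.2.2 = false then r.1 ++ [r.2.1] else r.1).map String.mk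

-- ===== PRECONDITION & SPEC =====
def Spec_dsv_record_load (line : String) (delimiter : String) (out : List String) : Prop := out = dsv_record_load_alt line delimiter
instance (line : String) (delimiter : String) (out : List String) : Decidable (Spec_dsv_record_load line delimiter out) := by unfold Spec_dsv_record_load; infer_instance

-- ===== CLAIM (what is proved, stated in full; the proofs are below) =====
def Claim_equal_dsv_record_load : Prop := ∀ (line : String) (delimiter : String), Dom_dsv_record_load line delimiter → Spec_dsv_record_load line delimiter (dsv_record_load line delimiter)

-- ===== LEMMAS AND PROOFS =====

-- the list of fields contributed by the rest of the scan, given mid-field state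
def pvG (delimiter : String) (esc : Bool) (cur : List Char) (hit : Bool) :
    List Char → List (List Char)
  | [] => if hit then [] else [cur]
  | c :: rest =>
    if esc then pvG delimiter false (cur ++ [pvEscGet c]) false rest
    else if c = '\\' then pvG delimiter true cur false rest
    else if String.mk [c] = delimiter then cur :: pvG delimiter false [] true rest
    else pvG delimiter false (cur ++ [c]) false rest

-- finalizer of B's fold state: close the open field unless the last char ended one
def pvFin (r : List (List Char) × List Char × Bool × Bool) : List (List Char) :=
  if r.2.2.2 then r.1 else r.1 ++ [r.2.1]

-- L1: the fold's finalized result is out ++ pvG …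
theorem pvFold_eq_G (delimiter : String) (cs : List Char) :
    ∀ (out : List (List Char)) (cur : List Char) (esc hit : Bool),
      pvFin (cs.foldl (pvAltStep delimiter) (out, cur, esc, hit)) =
        out ++ pvG delimiter esc cur hit cs := by
  induction cs with
  | nil =>
    intro out cur esc hit
    cases hit <;> simp [pvG, pvFin]
  | cons c rest ih =>
    intro out cur esc hit
    simp only [List.foldl_cons, pvAltStep, pvG]
    split_ifs with h1 h2 h3
    · exact ih out (cur ++ [pvEscGet c]) false false
    · exact ih out cur true false
    · rw [ih (out ++ [cur]) [] false true]; simp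
    · exact ih out (cur ++ [c]) false false

-- L2: pvG unfolds one whole field at a time, matching pvValueLoad
theorem pvG_step (delimiter : String) (cs : List Char) :
    ∀ (esc : Bool) (cur : List Char) (hit : Bool), cs ≠ [] →
      pvG delimiter esc cur hit cs =
        (pvValueLoad delimiter esc cur cs).1 ::
          pvG delimiter false [] true (cs.drop (pvValueLoad delimiter esc cur cs).2) := by
  induction cs with
  | nil => intro _ _ _ h; exact absurd rfl h
  | cons c rest ih =>
    intro esc cur hit _
    simp only [pvG, pvValueLoad]
    split_ifs with h1 h2 h3
    · rcases em (rest = []) with hr | hr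
      · subst hr; simp [pvG, pvValueLoad]
      · rw [ih false (cur ++ [pvEscGet c]) false hr]
        simp
    · rcases em (rest = []) with hr | hr
      · subst hr; simp [pvG, pvValueLoad]
      · rw [ih true cur false hr]
        simp
    · simp
    · rcases em (rest = []) with hr | hr
      · subst hr; simp [pvG, pvValueLoad]
      · rw [ih false (cur ++ [c]) false hr]
        simp

-- L3: pvG from a fresh just-hit state equals A's record loop
theorem pvG_eq_recordLoad (delimiter : String) (cs : List Char) :
    pvG delimiter false [] true cs = pvRecordLoad delimiter cs := by
  rcases em (cs = []) with h | h
  · subst h; simp [pvG, pvRecordLoad]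
  · rw [pvG_step delimiter cs false [] true h, pvRecordLoad, dif_neg h]
    have hlen := pvValueLoad_pos delimiter false [] cs h
    have : (cs.drop (pvValueLoad delimiter false [] cs).2).length < cs.length := by
      have : cs.length ≠ 0 := fun h0 => h (List.eq_nil_of_length_eq_zero h0)
      simp only [List.length_drop]; omega
    rw [pvG_eq_recordLoad delimiter (cs.drop (pvValueLoad delimiter false [] cs).2)]
termination_by cs.length

-- ===== VERDICT (by name: the statement is the Claim_ definition above) =====
theorem dsv_record_load_spec : Claim_equal_dsv_record_load := by
  intro line delimiter _
  unfold Spec_dsv_record_load dsv_record_load dsv_record_load_alt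
  rcases em ((PySem.Str.strip line).toList = []) with h | h
  · simp [h, pvRecordLoad]
  · have hfold := pvFold_eq_G delimiter (PySem.Str.strip line).toList [] [] false false
    have hG : pvG delimiter false [] false (PySem.Str.strip line).toList
        = pvRecordLoad delimiter (PySem.Str.strip line).toList := by
      rw [pvG_step delimiter _ false [] false h, pvRecordLoad, dif_neg h,
        pvG_eq_recordLoad]
    set r := ((PySem.Str.strip line).toList).foldl (pvAltStep delimiter) ([], [], false, false)
      with hr
    have hif : (if (PySem.Str.strip line).toList ≠ [] ∧ r.2.2.2 = false then r.1 ++ [r.2.1]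
        else r.1) = pvFin r := by
      unfold pvFin
      have h' : ¬PySem.Chars.strip line.toList = [] := by simpa using h
      rcases hb : r.2.2.2 with _ | _ <;> simp [hb, h']
    simp only [hif, ← hr] at *
    rw [hfold, hG]
    simp
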